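-- pv_equiv track=rewrite | github.com/xflasar/Friend-Stuff-Freelance-Help-Etc | 1-8 Lectures/2/Posloupnosti/Podposloupnosti.py | special_sequence
-- ===== SOURCE A (Python) =====
-- def special_sequence(n):
--     sequence = []
--     i = 1
--     while len(sequence) < n:
--         for j in range(1, i + 1):
--             sequence.append(j)
--         i += 1
--     return sequence[:n]
-- ===== SOURCE B (Python) =====
-- def _isqrt(x):
--     # binary search for the integer square root of x >= 0:
--     # invariant lo*lo <= x < hi*hi
--     lo, hi = 0, x + 1
--     while hi - lo > 1:
--         mid = (lo + hi) // 2
--         if mid * mid <= x: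
--             lo = mid
--         else:
--             hi = mid
--     return lo
--
--
-- def special_sequence(n):
--     out = []
--     for k in range(n):
--         m = (_isqrt(8 * k + 1) - 1) // 2      # row of index k: largest m with m*(m+1)//2 <= k
--         out.append(k - m * (m + 1) // 2 + 1)  # position inside the row
--     return out
-- ===== Notes on version B (the rewrite author's own statement) =====
-- stated objective: alternative
-- what changed: B computes each element independently in closed form (its row found via a binary-search integer square root, then its position within the row) instead of A's append-rows-until-long-enough loop followed by a slice.
import Mathlib
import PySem

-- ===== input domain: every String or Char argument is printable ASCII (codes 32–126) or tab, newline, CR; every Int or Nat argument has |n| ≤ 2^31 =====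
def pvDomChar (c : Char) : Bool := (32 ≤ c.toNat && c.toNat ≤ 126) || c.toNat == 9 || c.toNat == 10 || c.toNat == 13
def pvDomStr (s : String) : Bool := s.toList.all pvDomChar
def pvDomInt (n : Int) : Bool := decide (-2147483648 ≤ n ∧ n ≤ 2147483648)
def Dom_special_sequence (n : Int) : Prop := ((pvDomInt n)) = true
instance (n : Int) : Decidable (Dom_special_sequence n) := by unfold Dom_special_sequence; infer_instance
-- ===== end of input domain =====

-- B: each element of the truncated triangular sequence is computed independently in closed
-- form (row found by a binary-search integer square root) instead of A's append-and-slice loop.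

-- ===== PORT A =====
-- A's while-loop; the Python counter `i` (which starts at 1) is represented as `i + 1`
-- for a Nat counter `i` starting at 0, so the appended block is range(1, (i+1)+1).
def seqLoop (n : Int) (seq : List Int) (i : Nat) : List Int :=
  if (seq.length : Int) < n then
    seqLoop n (seq ++ PySem.List.pyRange 1 ((i : Int) + 1 + 1) 1) (i + 1)
  else seq
termination_by (n - seq.length).toNat
decreasing_by
  simp only [PySem.List.pyRange_one, List.length_append, List.length_map, List.length_range]
  omega

def special_sequence (n : Int) : List Int :=
  PySem.List.slice (seqLoop n [] 0) none (some n)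

-- ===== PORT B =====
-- binary-search integer square root (Source B's _isqrt): invariant lo*lo ≤ x < hi*hi
def isqrtLoop (x lo hi : Int) : Int :=
  if hi - lo > 1 then
    let mid := PySem.Int.floordiv (lo + hi) 2
    if mid * mid ≤ x then isqrtLoop x mid hi else isqrtLoop x lo mid
  else lo
termination_by (hi - lo).toNat
decreasing_by
  all_goals
    simp only [PySem.Int.floordiv_eq_ediv_of_pos (by omega : (0:Int) < 2)]
    omega

def pyIsqrt (x : Int) : Int := isqrtLoop x 0 (x + 1)

-- the loop body of Source B: value of index k computed in closed form
def fColumn (k : Int) : Int :=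
  let m := PySem.Int.floordiv (pyIsqrt (8 * k + 1) - 1) 2
  k - PySem.Int.floordiv (m * (m + 1)) 2 + 1

def special_sequence_alt (n : Int) : List Int :=
  (PySem.List.pyRange 0 n 1).foldl (fun out k => out ++ [fColumn k]) []

-- ===== PRECONDITION & SPEC =====
def Spec_special_sequence (n : Int) (out : List Int) : Prop := out = special_sequence_alt n
instance (n : Int) (out : List Int) : Decidable (Spec_special_sequence n out) := by unfold Spec_special_sequence; infer_instance

-- ===== CLAIM (what is proved, stated in full; the proofs are below) =====
def Claim_equal_special_sequence : Prop := ∀ (n : Int), Dom_special_sequence n → Spec_special_sequence n (special_sequence n)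

-- ===== LEMMAS AND PROOFS =====

-- triangular numbers
def triN (m : Nat) : Nat := m * (m + 1) / 2

theorem two_triN (m : Nat) : 2 * triN m = m * (m + 1) := by
  unfold triN
  exact Nat.mul_div_cancel' (even_iff_two_dvd.mp (Nat.even_mul_succ_self m))

theorem triN_succ (m : Nat) : triN (m + 1) = triN m + (m + 1) := by
  have h1 := two_triN m
  have h2 := two_triN (m + 1)
  have h3 : (m + 1) * (m + 1 + 1) = m * (m + 1) + 2 * (m + 1) := by ring
  omega

theorem isqrtLoop_spec_aux (N : Nat) : ∀ (x lo hi : Int), (hi - lo).toNat ≤ N →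
    0 ≤ lo → lo * lo ≤ x → x < hi * hi → lo < hi →
    isqrtLoop x lo hi * isqrtLoop x lo hi ≤ x ∧
      x < (isqrtLoop x lo hi + 1) * (isqrtLoop x lo hi + 1) ∧ 0 ≤ isqrtLoop x lo hi := by
  induction N with
  | zero =>
      intro x lo hi hN h0 h1 h2 h3
      omega
  | succ N ih =>
      intro x lo hi hN h0 h1 h2 h3
      by_cases hgt : hi - lo > 1
      · have hmid : PySem.Int.floordiv (lo + hi) 2 = (lo + hi) / 2 :=
          PySem.Int.floordiv_eq_ediv_of_pos (by omega)
        have hunf : isqrtLoop x lo hi =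
            if PySem.Int.floordiv (lo + hi) 2 * PySem.Int.floordiv (lo + hi) 2 ≤ x then
              isqrtLoop x (PySem.Int.floordiv (lo + hi) 2) hi
            else isqrtLoop x lo (PySem.Int.floordiv (lo + hi) 2) := by
          rw [isqrtLoop, if_pos hgt]
        by_cases hle : PySem.Int.floordiv (lo + hi) 2 * PySem.Int.floordiv (lo + hi) 2 ≤ x
        · rw [hunf, if_pos hle]
          exact ih x _ hi (by omega) (by omega) hle h2 (by omega)
        · rw [hunf, if_neg hle]
          exact ih x lo _ (by omega) h0 h1 (by omega) (by omega)
      · have hunf : isqrtLoop x lo hi = lo := by rw [isqrtLoop, if_neg hgt]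
        rw [hunf]
        have hhi : hi = lo + 1 := by omega
        subst hhi
        exact ⟨h1, h2, h0⟩

theorem isqrtLoop_spec (x lo hi : Int) :
    0 ≤ lo → lo * lo ≤ x → x < hi * hi → lo < hi →
    isqrtLoop x lo hi * isqrtLoop x lo hi ≤ x ∧
      x < (isqrtLoop x lo hi + 1) * (isqrtLoop x lo hi + 1) ∧ 0 ≤ isqrtLoop x lo hi :=
  isqrtLoop_spec_aux (hi - lo).toNat x lo hi le_rfl

theorem pyIsqrt_spec (x : Int) (hx : 0 ≤ x) :
    pyIsqrt x * pyIsqrt x ≤ x ∧ x < (pyIsqrt x + 1) * (pyIsqrt x + 1) ∧ 0 ≤ pyIsqrt x := by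
  exact isqrtLoop_spec x 0 (x + 1) le_rfl (by simpa) (by nlinarith) (by omega)

-- closed-form value on row m
theorem fColumn_row (m k : Nat) (h1 : triN m ≤ k) (h2 : k < triN (m + 1)) :
    fColumn (k : Int) = (k : Int) - (triN m : Int) + 1 := by
  have ht : (2 : Int) * (triN m : Int) = (m : Int) * ((m : Int) + 1) := by
    exact_mod_cast two_triN m
  have hx : (0 : Int) ≤ 8 * (k : Int) + 1 := by positivity
  obtain ⟨hr1, hr2, hr0⟩ := pyIsqrt_spec (8 * (k : Int) + 1) hx
  set r := pyIsqrt (8 * (k : Int) + 1) with hrdef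
  have hk1 : (triN m : Int) ≤ (k : Int) := by exact_mod_cast h1
  have hk2 : (k : Int) ≤ (triN m : Int) + (m : Int) := by
    have h2' : k ≤ triN m + m := by rw [triN_succ] at h2; omega
    exact_mod_cast h2'
  have hlow : (2 * (m : Int) + 1) * (2 * (m : Int) + 1) ≤ 8 * (k : Int) + 1 := by nlinarith
  have hup : 8 * (k : Int) + 1 < (2 * (m : Int) + 3) * (2 * (m : Int) + 3) := by nlinarith
  have hm0 : (0 : Int) ≤ (m : Int) := Int.natCast_nonneg m
  have hrlo : 2 * (m : Int) + 1 ≤ r := by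
    by_contra hc
    push Not at hc
    have hab : r + 1 ≤ 2 * (m : Int) + 1 := by omega
    have := mul_le_mul hab hab (by omega : (0 : Int) ≤ r + 1) (by omega : (0 : Int) ≤ 2 * (m : Int) + 1)
    omega
  have hrhi : r ≤ 2 * (m : Int) + 2 := by
    by_contra hc
    push Not at hc
    have hab : 2 * (m : Int) + 3 ≤ r := by omega
    have := mul_le_mul hab hab (by omega : (0 : Int) ≤ 2 * (m : Int) + 3) (by omega : (0 : Int) ≤ r)
    omega
  have hmEq : PySem.Int.floordiv (r - 1) 2 = (m : Int) := by
    rw [PySem.Int.floordiv_eq_ediv_of_pos (by omega : (0:Int) < 2)]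
    omega
  have htEq : PySem.Int.floordiv ((m : Int) * ((m : Int) + 1)) 2 = (triN m : Int) := by
    rw [← ht, PySem.Int.floordiv_eq_ediv_of_pos (by omega : (0:Int) < 2)]
    omega
  simp only [fColumn, ← hrdef, hmEq, htEq]

def mapF (L : Nat) : List Int := (List.range L).map (fun k : Nat => fColumn (k : Int))

theorem mapF_tri_succ (m : Nat) :
    mapF (triN (m + 1)) = mapF (triN m) ++ PySem.List.pyRange 1 ((m : Int) + 1 + 1) 1 := by
  unfold mapF
  rw [triN_succ, List.range_add, List.map_append]
  congr 1
  rw [PySem.List.pyRange_one]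
  have hlen : (((m : Int) + 1 + 1) - 1).toNat = m + 1 := by omega
  rw [hlen, List.map_map]
  apply List.map_congr_left
  intro j hj
  have hj' : j < m + 1 := List.mem_range.mp hj
  simp only [Function.comp_apply]
  rw [fColumn_row m (triN m + j) (by omega) (by rw [triN_succ]; omega)]
  push_cast
  ring

theorem seqLoop_eq (n : Int) (seq : List Int) (i : Nat) :
    seq = mapF (triN i) → ∃ T : Nat, seqLoop n seq i = mapF T ∧ n ≤ (T : Int) := by
  induction seq, i using seqLoop.induct (n := n) with
  | case1 seq i hlt ih =>
      intro hseq
      rw [seqLoop, if_pos hlt]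
      exact ih (by rw [hseq, ← mapF_tri_succ])
  | case2 seq i hlt =>
      intro hseq
      rw [seqLoop, if_neg hlt]
      refine ⟨triN i, hseq, ?_⟩
      have hl : (seq.length : Int) = (triN i : Int) := by
        rw [hseq]; simp [mapF]
      omega

theorem alt_eq_mapF (n : Int) : special_sequence_alt n = mapF n.toNat := by
  unfold special_sequence_alt mapF
  rw [PySem.List.foldl_append_singleton_eq_map, PySem.List.pyRange_one, List.map_map]
  simp

-- ===== VERDICT (by name: the statement is the Claim_ definition above) =====
theorem special_sequence_spec : Claim_equal_special_sequence := by
  intro n _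
  unfold Spec_special_sequence special_sequence
  rw [alt_eq_mapF]
  by_cases hn : 0 ≤ n
  · obtain ⟨T, hT, hnT⟩ := seqLoop_eq n [] 0 rfl
    rw [hT, PySem.List.slice_to _ hn]
    unfold mapF
    rw [← List.map_take, List.take_range]
    have hle : n.toNat ≤ T := by omega
    rw [Nat.min_eq_left hle]
  · have h0 : seqLoop n [] 0 = [] := by
      rw [seqLoop, if_neg (by simp; omega)]
    have ht0 : n.toNat = 0 := by omega
    rw [h0, ht0]
    simp [mapF, PySem.List.slice]
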